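-- pv_equiv track=rewrite | github.com/deepaksharma36/Python-Assignements | lab9/holicow.py | result
-- ===== SOURCE A (Python) =====
-- def result(simulation_result):
--     """
--     this method figure out after all simulation by triggering with color maximum cows get painted
--     :param simulation_result: a dictionary of dictionary
--                               with key value of triggered vertex and value storing dictionary containing keys
--                               as cows and values as colors attached to the cow.
--     :return:  list of the color which color maximum number of cows and dictionary with keys as cows and values as number
--              of cows they paint.
--     """
--     result_table={}
--     for color in simulation_result:
--         count=0
--         for cow in simulation_result[color]:
--             count=count+len(simulation_result[color][cow])
--         result_table[color]=count
--     final_keys=[key for key in result_table if result_table[key]== max(result_table.values())]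
--     return  final_keys, result_table
-- ===== SOURCE B (Python) =====
-- def result(simulation_result):
--     """Single fused pass: build the count table and track the running argmax
--     colors at the same time, instead of a separate max()+filter scan."""
--     result_table = {}
--     best_count = None
--     best_keys = []
--     for color, cows in simulation_result.items():
--         count = 0
--         for value in cows.values():
--             count += len(value)
--         result_table[color] = count
--         if best_count is None or count > best_count:
--             best_count = count
--             best_keys = [color]
--         elif count == best_count:
--             best_keys.append(color)
--     return best_keys, result_table
-- ===== Notes on version B (the rewrite author's own statement) =====
-- stated objective: faster
-- what changed: B fuses the argmax into the counting pass with a running best_count/best_keys accumulator, iterating dict items/values directly, instead of A's separate filtering comprehension that recomputes max(result_table.values()) for every key.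
import Mathlib
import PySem

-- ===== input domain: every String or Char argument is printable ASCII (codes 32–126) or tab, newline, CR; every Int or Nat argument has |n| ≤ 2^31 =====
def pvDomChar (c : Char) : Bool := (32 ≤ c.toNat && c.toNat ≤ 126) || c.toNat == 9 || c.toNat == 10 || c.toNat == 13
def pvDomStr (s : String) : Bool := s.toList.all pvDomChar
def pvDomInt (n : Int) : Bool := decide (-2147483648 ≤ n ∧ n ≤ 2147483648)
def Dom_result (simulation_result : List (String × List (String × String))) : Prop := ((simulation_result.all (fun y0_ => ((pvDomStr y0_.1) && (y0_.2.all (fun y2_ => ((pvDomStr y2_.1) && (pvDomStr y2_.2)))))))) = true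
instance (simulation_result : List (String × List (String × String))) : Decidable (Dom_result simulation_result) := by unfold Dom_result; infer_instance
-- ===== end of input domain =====

-- B fuses the argmax scan into the counting pass with a running best-count/best-keys
-- accumulator over dict items (objective: faster — A recomputes max(values) per key).


-- the Python function receives a dict of dicts; this builds it from the association list
-- exactly as Python's dict() does (last value wins, key keeps its first position)
def inputDict (simulation_result : List (String × List (String × String))) :
    PySem.Dict String (PySem.Dict String String) :=
  PySem.Dict.ofList (simulation_result.map (fun p => (p.1, PySem.Dict.ofList p.2)))

-- ===== PORT A =====
-- inner loop of A: for cow in simulation_result[color]: count = count + len(simulation_result[color][cow])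
def resultCount (inner : PySem.Dict String String) : Int :=
  inner.keys.foldl (fun count cow => count + PySem.Str.len (inner.getD cow "")) 0

def result (simulation_result : List (String × List (String × String))) :
    List String × (List (String × Int)) :=
  let d := inputDict simulation_result
  let result_table : PySem.Dict String Int :=
    d.keys.foldl (fun rt color => rt.insert color (resultCount (d.getD color PySem.Dict.empty)))
      PySem.Dict.empty
  -- max(result_table.values()) is only evaluated when the comprehension iterates, i.e. when
  -- values is nonempty; `.getD 0` is then never the default, so this is exact (no ValueError path)
  let final_keys : List String := result_table.keys.filter (fun key =>
    result_table.getD key 0 == ((PySem.List.max? result_table.values (fun v => v)).getD 0))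
  (final_keys, result_table.items)

-- ===== PORT B =====
-- inner loop of B: for value in cows.values(): count += len(value)
def altCount (cows : PySem.Dict String String) : Int :=
  cows.values.foldl (fun count v => count + PySem.Str.len v) 0

-- one iteration of B's fused loop: state = (result_table, best_count, best_keys)
def altStep (st : PySem.Dict String Int × Option Int × List String)
    (p : String × PySem.Dict String String) :
    PySem.Dict String Int × Option Int × List String :=
  let count := altCount p.2
  let rt := st.1.insert p.1 count
  match st.2.1 with
  | none => (rt, some count, [p.1])
  | some b =>
    if count > b then (rt, some count, [p.1])
    else if count == b then (rt, some b, st.2.2 ++ [p.1])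
    else (rt, some b, st.2.2)

def result_alt (simulation_result : List (String × List (String × String))) :
    List String × (List (String × Int)) :=
  let st := (inputDict simulation_result).items.foldl altStep (PySem.Dict.empty, none, [])
  (st.2.2, st.1.items)

-- ===== PRECONDITION & SPEC =====
def Spec_result (simulation_result : List (String × List (String × String))) (out : List String × (List (String × Int))) : Prop := out = result_alt simulation_result
instance (simulation_result : List (String × List (String × String))) (out : List String × (List (String × Int))) : Decidable (Spec_result simulation_result out) := by unfold Spec_result; infer_instance

-- ===== CLAIM (what is proved, stated in full; the proofs are below) =====
def Claim_equal_result : Prop := ∀ (simulation_result : List (String × List (String × String))), Dom_result simulation_result → Spec_result simulation_result (result simulation_result)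

-- ===== LEMMAS AND PROOFS =====

-- B's argmax state transition, restricted to the (best_count, best_keys) components,
-- acting on the already-counted pairs (color, count)
def goStep (st : Option Int × List String) (q : String × Int) : Option Int × List String :=
  match st.1 with
  | none => (some q.2, [q.1])
  | some b =>
    if q.2 > b then (some q.2, [q.1])
    else if q.2 == b then (some b, st.2 ++ [q.1])
    else (some b, st.2)

theorem altStep_eq (st : PySem.Dict String Int × Option Int × List String)
    (q : String × PySem.Dict String String) :
    altStep st q = (st.1.insert q.1 (altCount q.2), goStep st.2 (q.1, altCount q.2)) := by
  obtain ⟨rt, b, ks⟩ := st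
  cases b <;> simp [altStep, goStep]
  split_ifs <;> rfl

theorem foldl_altStep (l : List (String × PySem.Dict String String))
    (rt : PySem.Dict String Int) (b : Option Int) (ks : List String) :
    l.foldl altStep (rt, b, ks) =
      (l.foldl (fun rt q => rt.insert q.1 (altCount q.2)) rt,
       (l.map (fun q => (q.1, altCount q.2))).foldl goStep (b, ks)) := by
  induction l generalizing rt b ks with
  | nil => rfl
  | cons q t ih =>
    simp only [List.foldl_cons, List.map_cons, altStep_eq]
    exact ih _ _ _

theorem go_some (cs : List (String × Int)) : ∀ (m : Int) (ks : List String),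
    cs.foldl goStep (some m, ks) =
      (some (cs.foldl (fun a q => max a q.2) m),
       (if cs.foldl (fun a q => max a q.2) m = m then ks else []) ++
         (cs.filter (fun q => q.2 == cs.foldl (fun a q => max a q.2) m)).map (·.1)) := by
  induction cs with
  | nil => intro m ks; simp
  | cons q t ih =>
    intro m ks
    have hproj : ∀ (u : List (String × Int)) (a : Int),
        u.foldl (fun x r => max x r.2) a = (u.map (·.2)).foldl max a := by
      intro u a; rw [List.foldl_map]
    have hle : ∀ (u : List (String × Int)) (a : Int),
        a ≤ u.foldl (fun x r => max x r.2) a := by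
      intro u a; rw [hproj]; exact (PySem.List.le_foldl_max _ a).1
    simp only [List.foldl_cons]
    rcases lt_trichotomy m q.2 with h1 | h1 | h1
    · rw [show goStep (some m, ks) q = (some q.2, [q.1]) by simp [goStep, h1]]
      rw [ih q.2 [q.1]]
      have hmax : max m q.2 = q.2 := by omega
      simp only [hmax]
      have hne : t.foldl (fun x r => max x r.2) q.2 ≠ m := by
        have := hle t q.2; omega
      simp only [hne, if_false, List.nil_append, List.filter_cons]
      by_cases hq : q.2 = t.foldl (fun x r => max x r.2) q.2
      · simp [← hq]
      · have : (q.2 == t.foldl (fun x r => max x r.2) q.2) = false := by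
          simp [hq]
        simp [this, Ne.symm hq]
    · rw [show goStep (some m, ks) q = (some m, ks ++ [q.1]) by
        simp [goStep, h1]]
      rw [ih m (ks ++ [q.1])]
      have hmax : max m q.2 = m := by omega
      simp only [hmax]
      by_cases hM : t.foldl (fun x r => max x r.2) m = m
      · simp [hM, ← h1]
      · have hq : (q.2 == t.foldl (fun x r => max x r.2) m) = false := by
          simp; omega
        simp [hM, hq]
    · rw [show goStep (some m, ks) q = (some m, ks) by
        simp only [goStep]
        rw [if_neg (by omega), if_neg (by simp; omega)]]
      rw [ih m ks]
      have hmax : max m q.2 = m := by omega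
      simp only [hmax]
      have hq : (q.2 == t.foldl (fun x r => max x r.2) m) = false := by
        have := hle t m; simp; omega
      simp [hq, List.filter_cons]

theorem values_update_sub {κ ν : Type} [BEq κ] [LawfulBEq κ] (ps : List (κ × ν)) :
    ∀ (d : PySem.Dict κ ν) (v : ν), v ∈ (d.update ps).values → v ∈ d.values ∨ v ∈ ps.map (·.2) := by
  induction ps with
  | nil => intro d v h; left; exact h
  | cons p t ih =>
    intro d v h
    have hstep : d.update (p :: t) = (d.insert p.1 p.2).update t := rfl
    rw [hstep] at h
    rcases ih _ v h with h' | h'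
    · rcases PySem.Dict.mem_values_insert d p.1 p.2 v h' with rfl | h''
      · right; simp
      · left; exact h''
    · right; simp only [List.map_cons]; exact List.mem_cons_of_mem _ h'

theorem inner_nodup (simulation_result : List (String × List (String × String))) (color : String) :
    ((inputDict simulation_result).getD color PySem.Dict.empty).keys.Nodup := by
  by_cases hc : (inputDict simulation_result).contains color = true
  · have hsome : ((inputDict simulation_result).get? color).isSome := by
      rw [← PySem.Dict.contains_eq_isSome_get?]; exact hc
    obtain ⟨v, hv⟩ := Option.isSome_iff_exists.mp hsome
    rw [PySem.Dict.getD_of_get?_eq_some _ _ hv]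
    have hm : (color, v) ∈ (inputDict simulation_result).items :=
      PySem.Dict.mem_items_of_get?_eq_some _ hv
    have hval : v ∈ (inputDict simulation_result).values :=
      List.mem_map_of_mem (f := fun x => x.2) hm
    have hsub := values_update_sub
      (simulation_result.map (fun p => (p.1, PySem.Dict.ofList p.2))) PySem.Dict.empty v
      (by exact hval)
    rcases hsub with h' | h'
    · exact absurd h' (by simp [PySem.Dict.empty, PySem.Dict.values])
    · rw [List.map_map] at h'
      obtain ⟨p, _, hp⟩ := List.mem_map.mp h'
      rw [← hp]
      exact PySem.Dict.nodup_keys_ofList _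
  · rw [PySem.Dict.getD_of_not_contains _ _ (by simpa using hc)]
    rw [PySem.Dict.keys_empty]
    exact List.nodup_nil

theorem count_eq (inner : PySem.Dict String String) (h : inner.keys.Nodup) :
    resultCount inner = altCount inner := by
  unfold resultCount altCount
  rw [PySem.Dict.values_eq_map_keys inner h "", List.foldl_map]

-- ===== VERDICT (by name: the statement is the Claim_ definition above) =====
theorem tables_eq (simulation_result : List (String × List (String × String))) :
    (inputDict simulation_result).keys.foldl
        (fun rt color => rt.insert color
          (resultCount ((inputDict simulation_result).getD color PySem.Dict.empty)))
        PySem.Dict.empty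
      = (inputDict simulation_result).items.foldl
          (fun rt q => rt.insert q.1 (altCount q.2)) PySem.Dict.empty := by
  have nd : (inputDict simulation_result).keys.Nodup := PySem.Dict.nodup_keys_ofList _
  have hkeysdef : (inputDict simulation_result).keys
      = (inputDict simulation_result).items.map (fun x => x.1) := rfl
  rw [hkeysdef, List.foldl_map]
  apply PySem.List.foldl_congr_mem
  intro acc q hq
  have hmem : (q.1, q.2) ∈ (inputDict simulation_result).items := by
    simpa using hq
  have h1 : (inputDict simulation_result).getD q.1 PySem.Dict.empty = q.2 :=
    PySem.Dict.getD_of_mem_items _ hmem nd _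
  have h2 := inner_nodup simulation_result q.1
  rw [h1] at h2
  rw [h1, count_eq _ h2]

theorem fold_items (simulation_result : List (String × List (String × String))) :
    ((inputDict simulation_result).items.foldl
        (fun rt q => rt.insert q.1 (altCount q.2)) PySem.Dict.empty).items
      = (inputDict simulation_result).items.map (fun q => (q.1, altCount q.2)) := by
  have nd : (inputDict simulation_result).keys.Nodup := PySem.Dict.nodup_keys_ofList _
  have h := PySem.Dict.items_foldl_insert_fresh
    (inputDict simulation_result).items (fun q => q.1) (fun q => altCount q.2)
    PySem.Dict.empty (fun a _ => PySem.Dict.contains_empty _) nd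
  simpa using h

theorem result_spec : Claim_equal_result := by
  intro simulation_result _
  unfold Spec_result result result_alt
  simp only []
  rw [foldl_altStep, tables_eq]
  have nd : (inputDict simulation_result).keys.Nodup := PySem.Dict.nodup_keys_ofList _
  set tbl := (inputDict simulation_result).items.foldl
    (fun rt q => rt.insert q.1 (altCount q.2)) PySem.Dict.empty with htbl
  set pairs := (inputDict simulation_result).items.map (fun q => (q.1, altCount q.2))
    with hpairs
  have hitems : tbl.items = pairs := fold_items simulation_result
  have hkeys : tbl.keys = pairs.map (fun q => q.1) := by
    simp only [PySem.Dict.keys, hitems]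
  have hvals : tbl.values = pairs.map (fun q => q.2) := by
    simp only [PySem.Dict.values, hitems]
  have ndk : tbl.keys.Nodup := by
    rw [hkeys, hpairs, List.map_map]
    exact nd
  refine Prod.ext ?_ (by simpa using hitems)
  simp only [hkeys, hvals, hitems]
  rw [List.filter_map]
  have hcongr : pairs.filter
      ((fun key => tbl.getD key 0 ==
        ((PySem.List.max? (pairs.map fun q => q.2) (fun v => v)).getD 0)) ∘ (fun q => q.1))
      = pairs.filter (fun q => q.2 ==
        ((PySem.List.max? (pairs.map fun q => q.2) (fun v => v)).getD 0)) := by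
    apply List.filter_congr
    intro q hqp
    have hmem : (q.1, q.2) ∈ tbl.items := by rw [hitems]; simpa using hqp
    have : tbl.getD q.1 0 = q.2 := PySem.Dict.getD_of_mem_items _ hmem ndk _
    simp [Function.comp, this]
  rw [hcongr]
  clear hcongr hkeys hvals hitems ndk htbl
  cases pairs with
  | nil => simp
  | cons q0 t =>
    rw [show (q0 :: t).foldl goStep (none, []) = t.foldl goStep (some q0.2, [q0.1]) by
      simp [goStep]]
    rw [go_some]
    have hM : ((PySem.List.max? ((q0 :: t).map fun q => q.2) (fun v => v)).getD 0)
        = t.foldl (fun a q => max a q.2) q0.2 := by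
      rw [List.map_cons, PySem.List.max?_id_cons, Option.getD_some, List.foldl_map]
    rw [hM]
    by_cases hq : q0.2 = t.foldl (fun a q => max a q.2) q0.2
    · simp [List.filter_cons, ← hq]
    · have h1 : (q0.2 == t.foldl (fun a q => max a q.2) q0.2) = false := by simp [hq]
      simp [List.filter_cons, h1, Ne.symm hq]
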